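-- pv_equiv track=rewrite | github.com/jbkinney/25_poolparty_private | poolparty/tests/test_region_multiscan.py | _find_replacement_positions
-- ===== SOURCE A (Python) =====
-- def _find_replacement_positions(seq, original_char, replacement_char, replacement_length):
--     """Find 0-based positions where replacement_char runs occur in a sequence of original_char."""
--     positions = []
--     i = 0
--     while i <= len(seq) - replacement_length:
--         if all(seq[i + j] == replacement_char for j in range(replacement_length)):
--             positions.append(i)
--             i += replacement_length
--         else:
--             i += 1
--     return positions
-- ===== SOURCE B (Python) =====
-- def _find_replacement_positions(seq, original_char, replacement_char, replacement_length):
--     """Find 0-based positions where replacement_char runs occur in a sequence of original_char.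
--
--     Single pass: walk the sequence once, tracking the start of the current
--     maximal run of replacement_char; when a run of length m ends, it contributes
--     exactly m // replacement_length non-overlapping positions spaced replacement_length apart.
--     """
--     positions = []
--     run_start = 0
--     for i, ch in enumerate(seq):
--         if ch != replacement_char:
--             run_len = i - run_start
--             for t in range(run_len // replacement_length):
--                 positions.append(run_start + t * replacement_length)
--             run_start = i + 1
--     run_len = len(seq) - run_start
--     for t in range(run_len // replacement_length):
--         positions.append(run_start + t * replacement_length)
--     return positions
-- ===== Notes on version B (the rewrite author's own statement) =====
-- stated objective: alternative
-- what changed: Replaces the rescan-every-window while loop (which re-tests up to replacement_length characters at each index) with a single pass over the sequence that tracks maximal runs of replacement_char and emits floor(run_len/replacement_length) evenly spaced positions per run.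
import Mathlib
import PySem

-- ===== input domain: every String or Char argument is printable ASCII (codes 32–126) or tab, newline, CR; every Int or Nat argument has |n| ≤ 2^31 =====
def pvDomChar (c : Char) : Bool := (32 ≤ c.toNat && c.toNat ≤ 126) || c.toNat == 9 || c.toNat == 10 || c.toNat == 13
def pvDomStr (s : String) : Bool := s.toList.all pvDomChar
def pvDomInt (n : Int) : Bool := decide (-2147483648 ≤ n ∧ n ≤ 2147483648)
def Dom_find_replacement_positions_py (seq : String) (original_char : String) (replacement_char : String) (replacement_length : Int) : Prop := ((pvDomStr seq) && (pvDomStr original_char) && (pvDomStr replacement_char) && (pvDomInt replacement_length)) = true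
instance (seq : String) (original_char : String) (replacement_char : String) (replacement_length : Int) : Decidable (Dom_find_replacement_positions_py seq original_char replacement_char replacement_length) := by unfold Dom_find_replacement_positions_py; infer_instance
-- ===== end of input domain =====

-- B replaces A's window-rescanning while loop by a single run-tracking pass over the sequence; equivalence is proved for replacement_length ≥ 1 (A's while loop never terminates otherwise).


-- ===== PORT A =====
-- Python `one_char_string == replacement_char` (exact: the 1-char string equals replacement_char iff replacement_char's char list is exactly [ch])
def pvChEq (c : String) (ch : Char) : Bool := c.toList == [ch]

-- `all(seq[i + j] == replacement_char for j in range(replacement_length))`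
def pvWindowA (seq : String) (c : String) (i L : Int) : Bool :=
  (PySem.List.pyRange 0 L 1).all (fun j =>
    match PySem.Str.pyGet? seq (i + j) with
    | some ch => pvChEq c ch
    | none => false)

-- the while loop of A, with fuel (the loop terminates iff 1 ≤ replacement_length; the fuel below suffices then, see Pre_)
def pvLoopA (seq : String) (c : String) (L : Int) : Nat → Int → List Int → List Int
  | 0, _, positions => positions
  | fuel + 1, i, positions =>
    if i ≤ PySem.Str.len seq - L then
      if pvWindowA seq c i L then pvLoopA seq c L fuel (i + L) (positions ++ [i])
      else pvLoopA seq c L fuel (i + 1) positions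
    else positions

def find_replacement_positions_py (seq : String) (original_char : String) (replacement_char : String) (replacement_length : Int) : List Int :=
  pvLoopA seq replacement_char replacement_length (seq.toList.length + 1) 0 []

-- ===== PORT B =====
-- `for t in range(run_len // replacement_length): positions.append(run_start + t * replacement_length)`
def pvEmit (run_start m L : Int) : List Int :=
  (PySem.List.pyRange 0 (PySem.Int.floordiv m L) 1).map (fun t => run_start + t * L)

-- the `for i, ch in enumerate(seq)` loop of B, then the final flush at end of string
def pvLoopB (c : String) (L : Int) : List Char → Int → Int → List Int → List Int
  | [], i, run_start, positions => positions ++ pvEmit run_start (i - run_start) L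
  | ch :: rest, i, run_start, positions =>
    if pvChEq c ch then pvLoopB c L rest (i + 1) run_start positions
    else pvLoopB c L rest (i + 1) (i + 1) (positions ++ pvEmit run_start (i - run_start) L)

def find_replacement_positions_py_alt (seq : String) (original_char : String) (replacement_char : String) (replacement_length : Int) : List Int :=
  pvLoopB replacement_char replacement_length seq.toList 0 0 []

-- ===== PRECONDITION & SPEC =====
-- Pre_ excludes replacement_length ≤ 0, on which Python A never returns (its while loop runs forever: i never passes len(seq) - replacement_length).
def Pre_find_replacement_positions_py (seq : String) (original_char : String) (replacement_char : String) (replacement_length : Int) : Prop :=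
  1 ≤ replacement_length
instance (seq : String) (original_char : String) (replacement_char : String) (replacement_length : Int) : Decidable (Pre_find_replacement_positions_py seq original_char replacement_char replacement_length) := by unfold Pre_find_replacement_positions_py; infer_instance

def pvWitness_find_replacement_positions_py : String × String × String × Int := ("NNxNN", "x", "N", 2)

def Spec_find_replacement_positions_py (seq : String) (original_char : String) (replacement_char : String) (replacement_length : Int) (out : List Int) : Prop := out = find_replacement_positions_py_alt seq original_char replacement_char replacement_length
instance (seq : String) (original_char : String) (replacement_char : String) (replacement_length : Int) (out : List Int) : Decidable (Spec_find_replacement_positions_py seq original_char replacement_char replacement_length out) := by unfold Spec_find_replacement_positions_py; infer_instance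

-- ===== CLAIM (what is proved, stated in full; the proofs are below) =====
def Claim_equal_find_replacement_positions_py : Prop := ∀ (seq : String) (original_char : String) (replacement_char : String) (replacement_length : Int), Dom_find_replacement_positions_py seq original_char replacement_char replacement_length → Pre_find_replacement_positions_py seq original_char replacement_char replacement_length → Spec_find_replacement_positions_py seq original_char replacement_char replacement_length (find_replacement_positions_py seq original_char replacement_char replacement_length)

-- ===== LEMMAS AND PROOFS =====

-- Reference function both loops are reduced to: greedy scan over the boolean run map
-- (true = "this char equals replacement_char"), with window length Lm1+1 ≥ 1 built in.
def pvG (Lm1 : Nat) (bs : List Bool) (i : Int) : List Int :=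
  if _h : bs.length < Lm1 + 1 then []
  else if (bs.take (Lm1 + 1)).all id then i :: pvG Lm1 (bs.drop (Lm1 + 1)) (i + ((Lm1 : Int) + 1))
  else pvG Lm1 bs.tail (i + 1)
termination_by bs.length
decreasing_by
  · simp only [List.length_drop]; omega
  · simp only [List.length_tail]; omega

-- Nat-level form of pvEmit
def pvEmitN (p : Int) (m L' : Nat) : List Int :=
  (List.range (m / L')).map (fun t => p + ((t * L' : Nat) : Int))

theorem pvEmit_eq_emitN (p : Int) (m Lm1 : Nat) :
    pvEmit p (m : Int) ((Lm1 : Int) + 1) = pvEmitN p m (Lm1 + 1) := by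
  unfold pvEmit pvEmitN
  have h1 : PySem.Int.floordiv (m : Int) ((Lm1 : Int) + 1) = ((m / (Lm1 + 1) : Nat) : Int) := by
    unfold PySem.Int.floordiv
    rw [Int.fdiv_eq_ediv, if_pos (Or.inl (by omega : (0 : Int) ≤ (Lm1 : Int) + 1)),
      Int.natCast_div]
    push_cast
    ring
  rw [h1, PySem.List.pyRange_one, List.map_map]
  simp only [sub_zero, Int.toNat_natCast]
  apply List.map_congr_left
  intro t _
  simp only [Function.comp_apply]
  push_cast
  ring

theorem pvEmitN_cons (p : Int) (m L' : Nat) (h : L' ≤ m) (h0 : 0 < L') :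
    pvEmitN p m L' = p :: pvEmitN (p + L') (m - L') L' := by
  unfold pvEmitN
  rw [Nat.div_eq_sub_div h0 h, List.range_succ_eq_map]
  simp only [List.map_cons, Nat.zero_mul, Nat.cast_zero, add_zero, List.map_map]
  congr 1
  apply List.map_congr_left
  intro t _
  simp only [Function.comp_apply]
  push_cast
  ring

theorem pvEmitN_nil (p : Int) (m L' : Nat) (h : m < L') : pvEmitN p m L' = [] := by
  unfold pvEmitN
  rw [Nat.div_eq_of_lt h]
  simp

theorem pvG_short (Lm1 : Nat) (bs : List Bool) (i : Int) (h : bs.length < Lm1 + 1) :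
    pvG Lm1 bs i = [] := by
  rw [pvG]; simp [h]

theorem pvG_replicate_false (Lm1 : Nat) (m : Nat) (bs : List Bool) (p : Int) :
    pvG Lm1 (List.replicate m true ++ false :: bs) p
      = pvEmitN p m (Lm1 + 1) ++ pvG Lm1 bs (p + m + 1) := by
  induction m using Nat.strong_induction_on generalizing p with
  | _ m IH =>
  by_cases hm : Lm1 + 1 ≤ m
  · -- run long enough: emit p and recurse on the rest of the run
    rw [pvG]
    have hlen : (List.replicate m true ++ false :: bs).length = m + 1 + bs.length := by
      simp only [List.length_append, List.length_replicate, List.length_cons]; omega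
    have h1 : ¬ (List.replicate m true ++ false :: bs).length < Lm1 + 1 := by omega
    have htake : ((List.replicate m true ++ false :: bs).take (Lm1 + 1)).all id = true := by
      rw [List.take_append_of_le_length (by simp; omega), List.take_replicate]
      simp
    have hdrop : (List.replicate m true ++ false :: bs).drop (Lm1 + 1)
        = List.replicate (m - (Lm1 + 1)) true ++ false :: bs := by
      rw [List.drop_append_of_le_length (by simp; omega), List.drop_replicate]
    rw [dif_neg h1, if_pos htake, hdrop, IH (m - (Lm1 + 1)) (by omega)]
    rw [pvEmitN_cons p m (Lm1 + 1) hm (by omega)]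
    have hcast : ((Lm1 + 1 : Nat) : Int) = (Lm1 : Int) + 1 := by push_cast; ring
    rw [hcast]
    have harg : p + ((Lm1 : Int) + 1) + ((m - (Lm1 + 1) : Nat) : Int) + 1 = p + m + 1 := by
      push_cast [Nat.cast_sub hm]; ring
    rw [harg]
    simp
  · -- run shorter than the window
    rw [pvEmitN_nil p m (Lm1 + 1) (by omega), List.nil_append]
    by_cases hlen : (List.replicate m true ++ false :: bs).length < Lm1 + 1
    · rw [pvG_short Lm1 _ p hlen]
      have : bs.length < Lm1 + 1 := by simp at hlen; omega
      rw [pvG_short Lm1 bs _ this]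
    · rw [pvG]
      have htake : ((List.replicate m true ++ false :: bs).take (Lm1 + 1)).all id = false := by
        rw [List.all_eq_false]
        refine ⟨false, ?_, by simp⟩
        rw [List.take_append]
        refine List.mem_append_right _ ?_
        have h2 : Lm1 + 1 - (List.replicate m (true : Bool)).length = (Lm1 - m) + 1 := by
          simp only [List.length_replicate]; omega
        rw [h2, List.take_succ_cons]
        exact List.mem_cons_self ..
      rw [dif_neg hlen, htake, if_neg (by simp)]
      cases m with
      | zero =>
        simp only [List.replicate_zero, List.nil_append, List.tail_cons]
        norm_num
      | succ m' =>
        have htail : (List.replicate (m' + 1) true ++ false :: bs).tail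
            = List.replicate m' true ++ false :: bs := by
          simp [List.replicate_succ]
        rw [htail, IH m' (by omega)]
        rw [pvEmitN_nil (p + 1) m' (Lm1 + 1) (by omega), List.nil_append]
        have : p + 1 + (m' : Int) + 1 = p + ((m' : Nat) + 1 : Nat) + 1 := by push_cast; ring
        rw [this]

theorem pvG_replicate (Lm1 : Nat) (m : Nat) (p : Int) :
    pvG Lm1 (List.replicate m true) p = pvEmitN p m (Lm1 + 1) := by
  induction m using Nat.strong_induction_on generalizing p with
  | _ m IH =>
  by_cases hm : Lm1 + 1 ≤ m
  · rw [pvG]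
    have h1 : ¬ (List.replicate m (true : Bool)).length < Lm1 + 1 := by simp; omega
    have htake : ((List.replicate m (true : Bool)).take (Lm1 + 1)).all id = true := by
      rw [List.take_replicate]; simp
    rw [dif_neg h1, if_pos htake, List.drop_replicate, IH (m - (Lm1 + 1)) (by omega)]
    rw [pvEmitN_cons p m (Lm1 + 1) hm (by omega)]
    have hcast : ((Lm1 + 1 : Nat) : Int) = (Lm1 : Int) + 1 := by push_cast; ring
    rw [hcast]
  · rw [pvG_short Lm1 _ p (by simp; omega), pvEmitN_nil p m (Lm1 + 1) (by omega)]

theorem pvLoopB_eq (c : String) (Lm1 : Nat) (rest : List Char) :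
    ∀ (m : Nat) (p : Int) (acc : List Int),
      pvLoopB c ((Lm1 : Int) + 1) rest (p + m) p acc
        = acc ++ pvG Lm1 (List.replicate m true ++ rest.map (pvChEq c)) p := by
  induction rest with
  | nil =>
    intro m p acc
    simp only [pvLoopB, List.map_nil, List.append_nil]
    rw [add_sub_cancel_left, pvEmit_eq_emitN, pvG_replicate]
  | cons ch rest IH =>
    intro m p acc
    simp only [pvLoopB, List.map_cons]
    by_cases hch : pvChEq c ch
    · rw [if_pos hch]
      have harg : p + (m : Int) + 1 = p + ((m + 1 : Nat) : Int) := by push_cast; ring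
      rw [harg, IH (m + 1) p acc]
      rw [hch]
      congr 2
      rw [List.replicate_succ']
      simp
    · rw [if_neg hch]
      have hne : pvChEq c ch = false := by simpa using hch
      rw [add_sub_cancel_left, pvEmit_eq_emitN]
      have hIH := IH 0 (p + (m : Int) + 1) (acc ++ pvEmitN p m (Lm1 + 1))
      simp only [Nat.cast_zero, add_zero, List.replicate_zero, List.nil_append] at hIH
      rw [hIH, hne, pvG_replicate_false]
      simp

theorem pvWindowA_eq (seq : String) (c : String) (i : Int) (Lm1 : Nat)
    (h0 : 0 ≤ i) (hn : i + ((Lm1 : Int) + 1) ≤ (seq.toList.length : Int)) :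
    pvWindowA seq c i ((Lm1 : Int) + 1)
      = (((seq.toList.map (pvChEq c)).drop i.toNat).take (Lm1 + 1)).all id := by
  have hb : i.toNat + (Lm1 + 1) ≤ seq.toList.length := by omega
  rw [Bool.eq_iff_iff]
  simp only [pvWindowA, List.all_eq_true, PySem.List.mem_pyRange_one]
  constructor
  · intro h x hx
    rw [List.mem_iff_getElem] at hx
    obtain ⟨k, hk, rfl⟩ := hx
    have hkL : k < Lm1 + 1 := by
      have := hk; simp only [List.length_take, List.length_drop, List.length_map] at this; omega
    have h2 := h (k : Int) ⟨by omega, by omega⟩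
    have hcast : i + (k : Int) = ((i.toNat + k : Nat) : Int) := by omega
    rw [hcast, PySem.Str.pyGet?_natCast] at h2
    have hidx : i.toNat + k < seq.toList.length := by omega
    rw [List.getElem?_eq_getElem hidx] at h2
    simp only at h2
    have hk' : k < ((seq.toList.map (pvChEq c)).drop i.toNat).length := by
      simp only [List.length_drop, List.length_map]; omega
    rw [List.getElem_take, List.getElem_drop, List.getElem_map]
    exact h2
  · intro h j hj
    obtain ⟨hj0, hjL⟩ := hj
    have hcast : i + j = ((i.toNat + j.toNat : Nat) : Int) := by omega
    rw [hcast, PySem.Str.pyGet?_natCast]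
    have hidx : i.toNat + j.toNat < seq.toList.length := by omega
    rw [List.getElem?_eq_getElem hidx]
    have hkt : j.toNat < (((seq.toList.map (pvChEq c)).drop i.toNat).take (Lm1 + 1)).length := by
      simp only [List.length_take, List.length_drop, List.length_map]; omega
    have h2 := h _ (List.getElem_mem hkt)
    rw [List.getElem_take, List.getElem_drop, List.getElem_map] at h2
    exact h2

theorem pvLoopA_eq (seq : String) (c : String) (Lm1 : Nat) :
    ∀ (fuel : Nat) (i : Int) (acc : List Int), 0 ≤ i →
      seq.toList.length + 1 ≤ i.toNat + fuel →
      pvLoopA seq c ((Lm1 : Int) + 1) fuel i acc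
        = acc ++ pvG Lm1 ((seq.toList.map (pvChEq c)).drop i.toNat) i := by
  intro fuel
  induction fuel with
  | zero =>
    intro i acc h0 hf
    simp only [pvLoopA]
    rw [pvG_short]
    · simp
    · simp only [List.length_drop, List.length_map]; omega
  | succ fuel IH =>
    intro i acc h0 hf
    simp only [pvLoopA]
    rw [PySem.Str.len_eq]
    by_cases hc : i ≤ (seq.toList.length : Int) - ((Lm1 : Int) + 1)
    · rw [if_pos hc]
      have hn : i + ((Lm1 : Int) + 1) ≤ (seq.toList.length : Int) := by omega
      rw [pvWindowA_eq seq c i Lm1 h0 hn]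
      rw [pvG]
      have hlen : ¬ ((seq.toList.map (pvChEq c)).drop i.toNat).length < Lm1 + 1 := by
        simp only [List.length_drop, List.length_map]; omega
      rw [dif_neg hlen]
      by_cases hb : (((seq.toList.map (pvChEq c)).drop i.toNat).take (Lm1 + 1)).all id = true
      · rw [if_pos hb, hb, if_pos rfl]
        rw [IH (i + ((Lm1 : Int) + 1)) (acc ++ [i]) (by omega) (by omega)]
        rw [List.drop_drop]
        have harg : (i + ((Lm1 : Int) + 1)).toNat = i.toNat + (Lm1 + 1) := by omega
        rw [harg]
        simp
      · rw [if_neg hb]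
        have hb' : (((seq.toList.map (pvChEq c)).drop i.toNat).take (Lm1 + 1)).all id = false := by
          simpa using hb
        rw [hb', if_neg (by simp)]
        rw [IH (i + 1) acc (by omega) (by omega)]
        rw [List.tail_drop]
        have harg : (i + 1).toNat = i.toNat + 1 := by omega
        rw [harg]
    · rw [if_neg hc]
      rw [pvG_short]
      · simp
      · simp only [List.length_drop, List.length_map]; omega

-- ===== VERDICT (by name: the statement is the Claim_ definition above) =====
theorem find_replacement_positions_py_spec : Claim_equal_find_replacement_positions_py := by
  intro seq oc c L _ hPre
  have hL : 1 ≤ L := hPre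
  obtain ⟨Lm1, rfl⟩ : ∃ Lm1 : Nat, L = (Lm1 : Int) + 1 := ⟨(L - 1).toNat, by omega⟩
  unfold Spec_find_replacement_positions_py
  unfold find_replacement_positions_py find_replacement_positions_py_alt
  rw [pvLoopA_eq seq c Lm1 (seq.toList.length + 1) 0 [] (by omega) (by simp)]
  have hB := pvLoopB_eq c Lm1 seq.toList 0 0 []
  simp only [Nat.cast_zero, add_zero, List.replicate_zero, List.nil_append] at hB
  rw [hB]
  simp
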